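-- pv_equiv track=rewrite | github.com/zeroshade/universal-driver | jdbc/tools/api-coverage/api_coverage_report.py | expand_interface_methods
-- ===== SOURCE A (Python) =====
-- def expand_interface_methods(iface: str, parents: dict[str, list[str]], declared: dict[str, set[str]], cache: dict[str, set[str]]) -> set[str]:
--     if iface in cache:
--         return cache[iface]
--     res = set(declared.get(iface, set()))
--     for p in parents.get(iface, []):
--         res.update(expand_interface_methods(p, parents, declared, cache))
--     cache[iface] = res
--     return res
-- ===== SOURCE B (Python) =====
-- def expand_interface_methods(iface: str, parents: dict[str, list[str]], declared: dict[str, set[str]], cache: dict[str, set[str]]) -> set[str]: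
--     # Iterative explicit-stack DFS: one worklist, a visited set and a single
--     # shared accumulator instead of per-node memoized recursion; the given
--     # cache is only read, never written (A also populates `cache` in place;
--     # the return value is the same). Terminates on every input.
--     visited = set()
--     acc = set()
--     stack = [iface]
--     while stack:
--         n = stack.pop()
--         if n in visited:
--             continue
--         visited.add(n)
--         if n in cache:
--             acc.update(cache[n])
--             continue
--         acc.update(declared.get(n, set()))
--         stack.extend(reversed(parents.get(n, [])))
--     return acc
-- ===== Notes on version B (the rewrite author's own statement) =====
-- stated objective: alternative
-- what changed: Replaces the cache-memoized recursion (one method set built and unioned per interface) by an iterative explicit-stack DFS over a worklist with a visited set and one shared accumulator set; no recursion, and the cache is only read, never populated.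
import Mathlib
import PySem

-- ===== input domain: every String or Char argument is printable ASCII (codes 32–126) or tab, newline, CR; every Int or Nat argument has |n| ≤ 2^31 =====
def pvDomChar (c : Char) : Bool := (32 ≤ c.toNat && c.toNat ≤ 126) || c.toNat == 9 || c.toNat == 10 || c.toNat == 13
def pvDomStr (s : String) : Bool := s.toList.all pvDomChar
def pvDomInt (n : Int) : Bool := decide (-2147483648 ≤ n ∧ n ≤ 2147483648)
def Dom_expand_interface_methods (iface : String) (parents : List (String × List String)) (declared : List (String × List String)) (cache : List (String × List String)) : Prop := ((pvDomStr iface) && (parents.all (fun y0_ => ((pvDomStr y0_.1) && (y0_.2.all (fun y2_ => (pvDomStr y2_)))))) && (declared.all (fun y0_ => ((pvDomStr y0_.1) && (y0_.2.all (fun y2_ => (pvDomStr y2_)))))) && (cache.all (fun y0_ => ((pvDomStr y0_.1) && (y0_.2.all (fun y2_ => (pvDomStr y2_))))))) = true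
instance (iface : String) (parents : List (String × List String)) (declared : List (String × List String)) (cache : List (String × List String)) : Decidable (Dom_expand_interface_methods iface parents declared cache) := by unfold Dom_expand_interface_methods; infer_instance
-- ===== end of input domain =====

-- B replaces A's cache-memoized recursion (one method set per interface, unioned into the
-- parent's set) by an iterative explicit-stack DFS with a visited set accumulating every
-- method into ONE shared set; the return value is identical, but A also populates `cache`
-- in place while B only reads it.


-- ===== PORT A =====
-- Literal port of A's recursion; `fuel` is only a totality guard (Pre_ guarantees it is
-- never exhausted) and the mutated `cache` dict is threaded through, as in the Python.
def expandARec (parents declared : PySem.Dict String (List String)) :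
    Nat → String → PySem.Dict String (List String) →
    Option (List String × PySem.Dict String (List String))
  | 0, _, _ => none
  | fuel + 1, iface, cache =>
    match PySem.Dict.get? cache iface with
    | some v => some (v, cache)                       -- if iface in cache: return cache[iface]
    | none =>
      -- res = set(declared.get(iface, set())); for p in parents.get(iface, []): res.update(...)
      match (PySem.Dict.getD parents iface []).foldl
          (fun st p => st.bind (fun rc =>
            (expandARec parents declared fuel p rc.2).map
              (fun sc => (PySem.Set.update rc.1 sc.1, sc.2))))
          (some (PySem.Set.ofList (PySem.Dict.getD declared iface []), cache)) with
      | none => none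
      | some rc => some (rc.1, PySem.Dict.insert rc.2 iface rc.1)   -- cache[iface] = res; return res

def expand_interface_methods (iface : String) (parents : List (String × List String)) (declared : List (String × List String)) (cache : List (String × List String)) : List String :=
  match expandARec (PySem.Dict.mk parents) (PySem.Dict.mk declared) (parents.length + 1) iface (PySem.Dict.mk cache) with
  | some rc => rc.1
  | none => []

-- ===== PORT B =====
-- Source B is an iterative while loop over an explicit stack; it always terminates (every
-- uncached-unvisited pop marks its node visited forever, so each parent list is pushed at
-- most once).  The port uses well-founded recursion on |stack| + pvW (the total length of
-- the parent lists of the not-yet-visited dict keys); the lemmas below are exactly the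
-- decreasing_by obligations. The Lean stack list has Python's stack TOP at its HEAD
-- (`stack.pop()` = take the head, `stack.extend(reversed(ps))` = `ps ++ stack`).
def pvW (d : PySem.Dict String (List String)) (v : List String) : Nat :=
  ((d.items.filter (fun kv => decide (kv.1 ∉ v))).map (fun kv => kv.2.length)).sum

lemma pvWSumMono (L : List (String × List String)) (v w : List String)
    (hsub : ∀ x ∈ v, x ∈ w) :
    ((L.filter (fun kv => decide (kv.1 ∉ w))).map (fun kv => kv.2.length)).sum
      ≤ ((L.filter (fun kv => decide (kv.1 ∉ v))).map (fun kv => kv.2.length)).sum := by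
  induction L with
  | nil => simp
  | cons kv t ih =>
    by_cases hv : kv.1 ∈ v
    · have hw : kv.1 ∈ w := hsub _ hv
      rw [List.filter_cons_of_neg (by simp [hw]), List.filter_cons_of_neg (by simp [hv])]
      exact ih
    · by_cases hw : kv.1 ∈ w
      · rw [List.filter_cons_of_neg (by simp [hw]), List.filter_cons_of_pos (by simp [hv])]
        simp only [List.map_cons, List.sum_cons]
        omega
      · rw [List.filter_cons_of_pos (by simp [hw]), List.filter_cons_of_pos (by simp [hv])]
        simp only [List.map_cons, List.sum_cons]
        omega

lemma pvWSumDrop (L : List (String × List String)) (v w : List String)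
    (hsub : ∀ x ∈ v, x ∈ w) (n : String) (l : List String)
    (hmem : (n, l) ∈ L) (hnv : n ∉ v) (hnw : n ∈ w) :
    ((L.filter (fun kv => decide (kv.1 ∉ w))).map (fun kv => kv.2.length)).sum + l.length
      ≤ ((L.filter (fun kv => decide (kv.1 ∉ v))).map (fun kv => kv.2.length)).sum := by
  obtain ⟨s, t, rfl⟩ := List.append_of_mem hmem
  rw [List.filter_append, List.filter_append,
      List.filter_cons_of_neg (by simp [hnw]), List.filter_cons_of_pos (by simp [hnv])]
  simp only [List.map_append, List.sum_append, List.map_cons, List.sum_cons]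
  have h1 := pvWSumMono s v w hsub
  have h2 := pvWSumMono t v w hsub
  omega

lemma pvWMono (d : PySem.Dict String (List String)) (v w : List String)
    (hsub : ∀ x ∈ v, x ∈ w) : pvW d w ≤ pvW d v :=
  pvWSumMono d.items v w hsub

lemma pvWDrop (d : PySem.Dict String (List String)) (v : List String) (n : String)
    (l : List String) (hq : PySem.Dict.get? d n = some l) (hnv : n ∉ v) :
    pvW d (PySem.Set.add v n) + l.length ≤ pvW d v :=
  pvWSumDrop d.items v (PySem.Set.add v n)
    (fun x hx => (PySem.Set.mem_add v n x).mpr (Or.inl hx))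
    n l (PySem.Dict.mem_items_of_get?_eq_some d hq) hnv
    ((PySem.Set.mem_add v n n).mpr (Or.inr rfl))

-- the while loop of Source B; state = (visited, acc)
def pvLoopB (parents declared cache : PySem.Dict String (List String)) :
    List String → List String × List String → List String × List String
  | [], va => va                                       -- while stack: (loop exits)
  | n :: rest, (v, a) =>                               -- n = stack.pop()
    if h : PySem.Set.contains v n = true then
      pvLoopB parents declared cache rest (v, a)       -- if n in visited: continue
    else
      match PySem.Dict.get? cache n with
      | some s =>                                      -- if n in cache: acc.update(cache[n]); continue
        pvLoopB parents declared cache rest (PySem.Set.add v n, PySem.Set.update a s)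
      | none =>                                        -- acc.update(declared.get(n, set())); stack.extend(reversed(parents.get(n, [])))
        pvLoopB parents declared cache (PySem.Dict.getD parents n [] ++ rest)
          (PySem.Set.add v n, PySem.Set.update a (PySem.Dict.getD declared n []))
termination_by ns va => ns.length + pvW parents va.1
decreasing_by
  · simp only [List.length_cons]; omega
  · have hm := pvWMono parents v (PySem.Set.add v n)
      (fun x hx => (PySem.Set.mem_add v n x).mpr (Or.inl hx))
    simp only [List.length_cons]; omega
  · have hnv : n ∉ v := fun hm => h ((PySem.Set.contains_iff v n).mpr hm)
    cases hq : PySem.Dict.get? parents n with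
    | none =>
      have hgd : PySem.Dict.getD parents n [] = [] := by
        rw [PySem.Dict.getD_eq_get?_getD, hq]; rfl
      have hm := pvWMono parents v (PySem.Set.add v n)
        (fun x hx => (PySem.Set.mem_add v n x).mpr (Or.inl hx))
      simp only [hgd, List.nil_append, List.length_cons]; omega
    | some l =>
      have hgd : PySem.Dict.getD parents n [] = l := by
        rw [PySem.Dict.getD_eq_get?_getD, hq]; rfl
      have hd := pvWDrop parents v n l hq hnv
      simp only [hgd, List.length_append, List.length_cons]; omega

def expand_interface_methods_alt (iface : String) (parents : List (String × List String)) (declared : List (String × List String)) (cache : List (String × List String)) : List String :=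
  (pvLoopB (PySem.Dict.mk parents) (PySem.Dict.mk declared) (PySem.Dict.mk cache) [iface] ([], [])).2

-- ===== PRECONDITION & SPEC =====
-- `pvAcycB parents cache fuel [] n = true` says that no cycle of uncached interfaces is
-- reachable from n along parent edges (fuel `parents.length + 1` is always enough, see
-- pvAcycB_eq below: the check is exactly acyclicity of the uncached region reachable from n).
def pvAcycB (parents cache : PySem.Dict String (List String)) :
    Nat → List String → String → Bool
  | 0, _, _ => false
  | fuel + 1, seen, n =>
    if n ∈ seen then false
    else
      match PySem.Dict.get? cache n with
      | some _ => true
      | none =>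
        (PySem.Dict.getD parents n []).all (fun p => pvAcycB parents cache fuel (n :: seen) p)

-- Pre_ holds exactly on the inputs where the Python A returns normally: it fails iff the
-- recursion can reach a cycle of uncached interfaces (Python A then raises RecursionError).
-- The Nodup clause only says that the values of `cache` denote Python sets (duplicate-free
-- lists), which is true of every actual Python argument of type dict[str, set[str]].
def Pre_expand_interface_methods (iface : String) (parents : List (String × List String)) (declared : List (String × List String)) (cache : List (String × List String)) : Prop :=
  pvAcycB (PySem.Dict.mk parents) (PySem.Dict.mk cache) (parents.length + 1) [] iface = true ∧ ∀ p ∈ cache, List.Nodup p.2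
instance (iface : String) (parents : List (String × List String)) (declared : List (String × List String)) (cache : List (String × List String)) : Decidable (Pre_expand_interface_methods iface parents declared cache) := by unfold Pre_expand_interface_methods; infer_instance

def pvWitness_expand_interface_methods : String × (List (String × List String)) × (List (String × List String)) × (List (String × List String)) :=
  ("I", [("I", ["P"])], [("I", ["m1", "m2"]), ("P", ["m3"])], [])

def Spec_expand_interface_methods (iface : String) (parents : List (String × List String)) (declared : List (String × List String)) (cache : List (String × List String)) (out : List String) : Prop := out = expand_interface_methods_alt iface parents declared cache
instance (iface : String) (parents : List (String × List String)) (declared : List (String × List String)) (cache : List (String × List String)) (out : List String) : Decidable (Spec_expand_interface_methods iface parents declared cache out) := by unfold Spec_expand_interface_methods; infer_instance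

-- ===== CLAIM (what is proved, stated in full; the proofs are below) =====
def Claim_equal_expand_interface_methods : Prop := ∀ (iface : String) (parents : List (String × List String)) (declared : List (String × List String)) (cache : List (String × List String)), Dom_expand_interface_methods iface parents declared cache → Pre_expand_interface_methods iface parents declared cache → Spec_expand_interface_methods iface parents declared cache (expand_interface_methods iface parents declared cache)

-- ===== LEMMAS AND PROOFS =====

-- pvAcyc is the well-founded (seen = ancestor path) form of the acyclicity check used by
-- the proofs; pvAcycB_eq below identifies it with the fuelled pvAcycB of Pre_.
lemma pvMemKeys_of_get?_eq_some {d : PySem.Dict String (List String)} {n : String} {ps : List String}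
    (h : PySem.Dict.get? d n = some ps) : n ∈ d.keys := by
  by_contra hk
  rw [← PySem.Dict.get?_eq_none_iff_not_mem_keys] at hk
  simp [h] at hk

lemma pvMemKeys_of_mem_getD {d : PySem.Dict String (List String)} {n x : String}
    (h : x ∈ PySem.Dict.getD d n []) : n ∈ d.keys := by
  cases hq : PySem.Dict.get? d n with
  | none =>
    rw [PySem.Dict.getD_eq_get?_getD, hq] at h
    cases h
  | some ps => exact pvMemKeys_of_get?_eq_some hq

def pvMeasP (parents : PySem.Dict String (List String)) (P : String → Bool) (seen : List String) : Nat :=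
  ((parents.keys).filter (fun k => decide (k ∉ seen) && P k)).length

lemma pvMeasPLe (parents : List (String × List String)) (P : String → Bool) (seen : List String) :
    pvMeasP (PySem.Dict.mk parents) P seen ≤ parents.length := by
  unfold pvMeasP
  have h := List.length_filter_le (fun k => decide (k ∉ seen) && P k) (PySem.Dict.mk parents).keys
  simpa [PySem.Dict.keys_mk] using h

lemma pvFiltLt (l : List String) (P : String → Bool) (v w : List String)
    (hsub : ∀ x, x ∈ v → x ∈ w) (n : String)
    (hn : n ∈ l) (hP : P n = true) (hnv : n ∉ v) (hnw : n ∈ w) :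
    (l.filter (fun k => decide (k ∉ w) && P k)).length < (l.filter (fun k => decide (k ∉ v) && P k)).length := by
  obtain ⟨s, t, rfl⟩ := List.append_of_mem hn
  rw [← List.countP_eq_length_filter, ← List.countP_eq_length_filter,
      List.countP_append, List.countP_append,
      List.countP_cons_of_neg (by simp [hnw]),
      List.countP_cons_of_pos (by simp [hnv, hP])]
  have h1 : List.countP (fun k => decide (k ∉ w) && P k) s ≤ List.countP (fun k => decide (k ∉ v) && P k) s := by
    refine List.countP_mono_left (fun x _ hx => ?_)
    simp only [Bool.and_eq_true, decide_eq_true_eq] at hx ⊢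
    exact ⟨fun hv => hx.1 (hsub x hv), hx.2⟩
  have h2 : List.countP (fun k => decide (k ∉ w) && P k) t ≤ List.countP (fun k => decide (k ∉ v) && P k) t := by
    refine List.countP_mono_left (fun x _ hx => ?_)
    simp only [Bool.and_eq_true, decide_eq_true_eq] at hx ⊢
    exact ⟨fun hv => hx.1 (hsub x hv), hx.2⟩
  omega

def pvAcyc (parents cache : PySem.Dict String (List String)) (seen : List String) (n : String) : Bool :=
  if h : n ∈ seen then false
  else
    match PySem.Dict.get? cache n with
    | some _ => true
    | none =>
      (PySem.Dict.getD parents n []).attach.all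
        (fun p => pvAcyc parents cache (n :: seen) p.1)
termination_by pvMeasP parents (fun _ => true) seen
decreasing_by
  exact pvFiltLt _ _ seen (n :: seen) (fun x hx => List.mem_cons_of_mem _ hx) n
    (pvMemKeys_of_mem_getD p.2) rfl h List.mem_cons_self

-- The common value: pvEspec parents declared cache seen n is the method set A computes for
-- interface n (`seen` = path of ancestors, only there to make the recursion well-founded).
def pvEspec (parents declared cache : PySem.Dict String (List String)) (seen : List String) (n : String) : List String :=
  if h : n ∈ seen then []
  else
    match PySem.Dict.get? cache n with
    | some v => v
    | none =>
      (PySem.Dict.getD parents n []).attach.foldl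
        (fun acc p => PySem.Set.update acc (pvEspec parents declared cache (n :: seen) p.1))
        (PySem.Set.ofList (PySem.Dict.getD declared n []))
termination_by pvMeasP parents (fun _ => true) seen
decreasing_by
  exact pvFiltLt _ _ seen (n :: seen) (fun x hx => List.mem_cons_of_mem _ hx) n
    (pvMemKeys_of_mem_getD p.2) rfl h List.mem_cons_self

-- ---- unfolding bridges ----
lemma pvAcyc_seen {parents cache : PySem.Dict String (List String)} {seen : List String} {n : String}
    (hx : n ∈ seen) : pvAcyc parents cache seen n = false := by
  rw [pvAcyc, dif_pos hx]

lemma pvAcyc_cached {parents cache : PySem.Dict String (List String)} {seen : List String} {n : String}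
    {v : List String} (hs : n ∉ seen) (hc : PySem.Dict.get? cache n = some v) :
    pvAcyc parents cache seen n = true := by
  rw [pvAcyc, dif_neg hs, hc]

lemma pvAcyc_rec {parents cache : PySem.Dict String (List String)} {seen : List String} {n : String}
    (hs : n ∉ seen) (hc : PySem.Dict.get? cache n = none) :
    pvAcyc parents cache seen n
      = (PySem.Dict.getD parents n []).all (fun p => pvAcyc parents cache (n :: seen) p) := by
  rw [pvAcyc, dif_neg hs, hc]
  simp

lemma pvEspec_cached {parents declared cache : PySem.Dict String (List String)} {seen : List String}
    {n : String} {v : List String} (hs : n ∉ seen) (hc : PySem.Dict.get? cache n = some v) :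
    pvEspec parents declared cache seen n = v := by
  rw [pvEspec, dif_neg hs, hc]

lemma pvEspec_rec {parents declared cache : PySem.Dict String (List String)} {seen : List String}
    {n : String} (hs : n ∉ seen) (hc : PySem.Dict.get? cache n = none) :
    pvEspec parents declared cache seen n
      = (PySem.Dict.getD parents n []).foldl
          (fun acc p => PySem.Set.update acc (pvEspec parents declared cache (n :: seen) p))
          (PySem.Set.ofList (PySem.Dict.getD declared n [])) := by
  rw [pvEspec, dif_neg hs, hc]
  simp

lemma pvAllCongr {l : List String} {f g : String → Bool}
    (h : ∀ x ∈ l, f x = g x) : l.all f = l.all g := by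
  induction l with
  | nil => rfl
  | cons a t ih =>
    simp only [List.all_cons, h a List.mem_cons_self,
      ih (fun x hx => h x (List.mem_cons_of_mem _ hx))]

lemma pvAcycB_eq (parents cache : PySem.Dict String (List String)) :
    ∀ fuel seen n, pvMeasP parents (fun _ => true) seen + 1 ≤ fuel →
      pvAcycB parents cache fuel seen n = pvAcyc parents cache seen n := by
  intro fuel
  induction fuel with
  | zero => intro seen n hme; omega
  | succ fuel ih =>
    intro seen n hme
    rw [pvAcycB]
    by_cases hs : n ∈ seen
    · rw [if_pos hs, pvAcyc_seen hs]
    · rw [if_neg hs]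
      cases hcc : PySem.Dict.get? cache n with
      | some v => rw [pvAcyc_cached hs hcc]
      | none =>
        rw [pvAcyc_rec hs hcc]
        refine pvAllCongr (fun p hp => ?_)
        have hmlt : pvMeasP parents (fun _ => true) (n :: seen)
            < pvMeasP parents (fun _ => true) seen :=
          pvFiltLt _ _ seen (n :: seen) (fun x hx => List.mem_cons_of_mem _ hx) n
            (pvMemKeys_of_mem_getD hp) rfl hs List.mem_cons_self
        exact ih (n :: seen) p (by omega)

-- ---- small Set lemmas ----
lemma pvUpdOfList (s : PySem.Set String) (t : List String) :
    PySem.Set.update s (PySem.Set.ofList t) = PySem.Set.update s t := by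
  rw [PySem.Set.update_eq_append_filter, PySem.Set.update_eq_append_filter s t, PySem.Set.ofList_ofList]

lemma pvUpdAllMem (s : PySem.Set String) (t : List String) (h : ∀ x ∈ t, x ∈ s) :
    PySem.Set.update s t = s := by
  rw [PySem.Set.update_eq_append_filter]
  have hnil : List.filter (fun y => !s.contains y) (PySem.Set.ofList t) = [] := by
    rw [List.filter_eq_nil_iff]
    intro y hy
    have hys : y ∈ s := h y ((PySem.Set.mem_ofList t y).mp hy)
    intro hb
    have hct := (PySem.Set.contains_iff s y).mpr hys
    rw [hct] at hb
    simp at hb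
  rw [hnil, List.append_nil]

lemma pvUpdSubfilter (t : List String) (p : String → Bool) :
    ∀ b : PySem.Set String, (∀ y ∈ t, p y = false → y ∈ b) →
      PySem.Set.update b (t.filter p) = PySem.Set.update b t := by
  induction t with
  | nil => intro b _; rfl
  | cons y t ih =>
    intro b h
    by_cases hp : p y = true
    · rw [List.filter_cons_of_pos hp, PySem.Set.update_cons, PySem.Set.update_cons]
      exact ih (b.add y) (fun z hz hpz =>
        (PySem.Set.mem_add b y z).mpr (Or.inl (h z (List.mem_cons_of_mem _ hz) hpz)))
    · have hp' : p y = false := by simpa using hp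
      have hyb : y ∈ b := h y List.mem_cons_self hp'
      rw [List.filter_cons_of_neg (by simp [hp']), PySem.Set.update_cons, PySem.Set.add_of_mem hyb]
      exact ih b (fun z hz hpz => h z (List.mem_cons_of_mem _ hz) hpz)

lemma pvUpdUpd (a s : PySem.Set String) (t : List String) :
    PySem.Set.update a (PySem.Set.update s t) = PySem.Set.update (PySem.Set.update a s) t := by
  rw [PySem.Set.update_eq_append_filter s t, PySem.Set.update_append]
  rw [pvUpdSubfilter (PySem.Set.ofList t) (fun y => !s.contains y) (PySem.Set.update a s)
        (fun y _ hy => (PySem.Set.mem_update a s y).mpr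
          (Or.inr ((PySem.Set.contains_iff s y).mp (by simpa using hy))))]
  rw [pvUpdOfList]

lemma pvFoldAssoc (ps : List String) (g : String → List String) (a : PySem.Set String) :
    ∀ e : PySem.Set String,
      ps.foldl (fun acc p => PySem.Set.update acc (g p)) (PySem.Set.update a e) =
        PySem.Set.update a (ps.foldl (fun acc p => PySem.Set.update acc (g p)) e) := by
  induction ps with
  | nil => intro e; rfl
  | cons p ps ih =>
    intro e
    simp only [List.foldl_cons]
    rw [← pvUpdUpd, ih]

lemma pvNodupFold (ps : List String) (g : String → List String) :
    ∀ acc : PySem.Set String, acc.Nodup →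
      (ps.foldl (fun acc p => PySem.Set.update acc (g p)) acc).Nodup := by
  induction ps with
  | nil => intro acc h; exact h
  | cons p ps ih => intro acc h; exact ih _ (PySem.Set.nodup_update _ _ h)

-- ---- weakening: under pvAcyc, the `seen` argument is irrelevant ----
lemma pvAcycWeakenAux (parents cache : PySem.Dict String (List String)) :
    ∀ N : Nat, ∀ seen n,
      pvMeasP parents (fun _ => true) seen < N →
      pvAcyc parents cache seen n = true →
      ∀ seen', (∀ x ∈ seen', x ∈ seen) → pvAcyc parents cache seen' n = true := by
  intro N
  induction N with
  | zero => intro seen n hme; omega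
  | succ N ih =>
    intro seen n hme hac seen' hsub
    have hs : n ∉ seen := by
      intro hx; rw [pvAcyc_seen hx] at hac; cases hac
    have hs' : n ∉ seen' := fun hx => hs (hsub n hx)
    cases hcc : PySem.Dict.get? cache n with
    | some v => exact pvAcyc_cached hs' hcc
    | none =>
      rw [pvAcyc_rec hs hcc, List.all_eq_true] at hac
      rw [pvAcyc_rec hs' hcc, List.all_eq_true]
      intro p hp
      have hmlt : pvMeasP parents (fun _ => true) (n :: seen)
          < pvMeasP parents (fun _ => true) seen :=
        pvFiltLt _ _ seen (n :: seen) (fun x hx => List.mem_cons_of_mem _ hx) n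
          (pvMemKeys_of_mem_getD hp) rfl hs List.mem_cons_self
      exact ih (n :: seen) p (by omega) (hac p hp) (n :: seen')
        (fun x hx => by
          rcases List.mem_cons.mp hx with rfl | hx
          · exact List.mem_cons_self
          · exact List.mem_cons_of_mem _ (hsub x hx))

lemma pvAcycWeaken (parents cache : PySem.Dict String (List String)) {seen : List String} {n : String}
    (hac : pvAcyc parents cache seen n = true)
    (seen' : List String) (hsub : ∀ x ∈ seen', x ∈ seen) :
    pvAcyc parents cache seen' n = true :=
  pvAcycWeakenAux parents cache (pvMeasP parents (fun _ => true) seen + 1) seen n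
    (by omega) hac seen' hsub

lemma pvEspecWeakenAux (parents declared cache : PySem.Dict String (List String)) :
    ∀ N : Nat, ∀ seen n,
      pvMeasP parents (fun _ => true) seen < N →
      pvAcyc parents cache seen n = true →
      ∀ seen', (∀ x ∈ seen', x ∈ seen) →
        pvEspec parents declared cache seen' n = pvEspec parents declared cache seen n := by
  intro N
  induction N with
  | zero => intro seen n hme; omega
  | succ N ih =>
    intro seen n hme hac seen' hsub
    have hs : n ∉ seen := by
      intro hx; rw [pvAcyc_seen hx] at hac; cases hac
    have hs' : n ∉ seen' := fun hx => hs (hsub n hx)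
    cases hcc : PySem.Dict.get? cache n with
    | some v => rw [pvEspec_cached hs hcc, pvEspec_cached hs' hcc]
    | none =>
      rw [pvAcyc_rec hs hcc, List.all_eq_true] at hac
      rw [pvEspec_rec hs hcc, pvEspec_rec hs' hcc]
      refine List.foldl_ext _ _ _ (fun acc p hp => ?_)
      have hmlt : pvMeasP parents (fun _ => true) (n :: seen)
          < pvMeasP parents (fun _ => true) seen :=
        pvFiltLt _ _ seen (n :: seen) (fun x hx => List.mem_cons_of_mem _ hx) n
          (pvMemKeys_of_mem_getD hp) rfl hs List.mem_cons_self
      rw [ih (n :: seen) p (by omega) (hac p hp) (n :: seen')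
        (fun x hx => by
          rcases List.mem_cons.mp hx with rfl | hx
          · exact List.mem_cons_self
          · exact List.mem_cons_of_mem _ (hsub x hx))]

lemma pvEspecWeaken (parents declared cache : PySem.Dict String (List String)) {seen : List String} {n : String}
    (hac : pvAcyc parents cache seen n = true)
    (seen' : List String) (hsub : ∀ x ∈ seen', x ∈ seen) :
    pvEspec parents declared cache seen' n = pvEspec parents declared cache seen n :=
  pvEspecWeakenAux parents declared cache (pvMeasP parents (fun _ => true) seen + 1) seen n
    (by omega) hac seen' hsub

lemma pvEspecNodup (parents declared cache : PySem.Dict String (List String))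
    (hnd : ∀ k v, PySem.Dict.get? cache k = some v → v.Nodup) :
    ∀ seen n, (pvEspec parents declared cache seen n).Nodup := by
  intro seen n
  by_cases hs : n ∈ seen
  · rw [pvEspec, dif_pos hs]; exact List.nodup_nil
  · cases hcc : PySem.Dict.get? cache n with
    | some v => rw [pvEspec_cached hs hcc]; exact hnd n v hcc
    | none =>
      rw [pvEspec_rec hs hcc]
      exact pvNodupFold _ _ _ (PySem.Set.nodup_ofList _)

-- ---- A's port computes pvEspec ----
def pvCacheOK (parents declared cache0 c : PySem.Dict String (List String)) : Prop :=
  (∀ k v, PySem.Dict.get? c k = some v →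
      PySem.Dict.get? cache0 k = some v ∨
        (PySem.Dict.get? cache0 k = none ∧ v = pvEspec parents declared cache0 [] k)) ∧
  (∀ k v, PySem.Dict.get? cache0 k = some v → PySem.Dict.get? c k = some v)

lemma pvAmain (parents declared cache0 : PySem.Dict String (List String)) :
    ∀ fuel n seen c, pvCacheOK parents declared cache0 c →
      pvAcyc parents cache0 seen n = true →
      pvMeasP parents (fun _ => true) seen + 1 ≤ fuel →
      ∃ c', expandARec parents declared fuel n c =
              some (pvEspec parents declared cache0 seen n, c') ∧
            pvCacheOK parents declared cache0 c' ∧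
            (∀ k v, PySem.Dict.get? c k = some v → PySem.Dict.get? c' k = some v) := by
  intro fuel
  induction fuel with
  | zero => intro n seen c _ _ hme; omega
  | succ fuel ih =>
    intro n seen c hok hac hme
    have hs : n ∉ seen := by
      intro hx; rw [pvAcyc_seen hx] at hac; cases hac
    rw [expandARec]
    cases hcn : PySem.Dict.get? c n with
    | some v =>
      refine ⟨c, ?_, hok, fun k v h => h⟩
      simp only [hcn]
      rcases hok.1 n v hcn with h0 | ⟨h0, rfl⟩
      · rw [pvEspec_cached hs h0]
      · rw [pvEspecWeaken parents declared cache0 hac [] (by simp)]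
    | none =>
      have hc0 : PySem.Dict.get? cache0 n = none := by
        cases hcc : PySem.Dict.get? cache0 n with
        | none => rfl
        | some w => exact absurd (hok.2 n w hcc) (by simp [hcn])
      simp only [hcn]
      have hacR := hac
      rw [pvAcyc_rec hs hc0, List.all_eq_true] at hacR
      have he : pvEspec parents declared cache0 seen n
          = (PySem.Dict.getD parents n []).foldl
              (fun acc p => PySem.Set.update acc (pvEspec parents declared cache0 (n :: seen) p))
              (PySem.Set.ofList (PySem.Dict.getD declared n [])) := pvEspec_rec hs hc0
      have he0 : pvEspec parents declared cache0 [] n = pvEspec parents declared cache0 seen n :=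
        pvEspecWeaken parents declared cache0 hac [] (by simp)
      have IC : ∀ ps' : List String, (∀ p ∈ ps', pvAcyc parents cache0 (n :: seen) p = true) →
          (∀ p ∈ ps', pvMeasP parents (fun _ => true) (n :: seen)
              < pvMeasP parents (fun _ => true) seen) →
          ∀ (acc : List String) (c₁ : PySem.Dict String (List String)),
            pvCacheOK parents declared cache0 c₁ →
            (∀ k v, PySem.Dict.get? c k = some v → PySem.Dict.get? c₁ k = some v) →
            ∃ c₂, ps'.foldl
                (fun st p => st.bind (fun rc =>
                  (expandARec parents declared fuel p rc.2).map
                    (fun sc => (PySem.Set.update rc.1 sc.1, sc.2))))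
                (some (acc, c₁))
              = some (ps'.foldl
                  (fun acc p => PySem.Set.update acc (pvEspec parents declared cache0 (n :: seen) p)) acc, c₂)
              ∧ pvCacheOK parents declared cache0 c₂
              ∧ (∀ k v, PySem.Dict.get? c k = some v → PySem.Dict.get? c₂ k = some v) := by
        intro ps'
        induction ps' with
        | nil => intro _ _ acc c₁ h1 h2; exact ⟨c₁, rfl, h1, h2⟩
        | cons p ps' ihp =>
          intro hall hmes acc c₁ h1 h2
          have hmlt := hmes p List.mem_cons_self
          obtain ⟨c', heq, hok', hmono⟩ :=
            ih p (n :: seen) c₁ h1 (hall p List.mem_cons_self) (by omega)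
          simp only [List.foldl_cons, Option.bind_some, heq, Option.map_some]
          obtain ⟨c₂, heq2, hok2, hmono2⟩ :=
            ihp (fun q hq => hall q (List.mem_cons_of_mem _ hq))
              (fun q hq => hmes q (List.mem_cons_of_mem _ hq))
              (PySem.Set.update acc (pvEspec parents declared cache0 (n :: seen) p)) c'
              hok' (fun k v hk => hmono k v (h2 k v hk))
          exact ⟨c₂, heq2, hok2, hmono2⟩
      obtain ⟨c₂, hfold, hok₂, hmono₂⟩ :=
        IC (PySem.Dict.getD parents n []) hacR
          (fun p hp => pvFiltLt _ _ seen (n :: seen) (fun x hx => List.mem_cons_of_mem _ hx) n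
            (pvMemKeys_of_mem_getD hp) rfl hs List.mem_cons_self)
          (PySem.Set.ofList (PySem.Dict.getD declared n [])) c hok (fun k v h => h)
      refine ⟨PySem.Dict.insert c₂ n (pvEspec parents declared cache0 seen n), ?_, ⟨?_, ?_⟩, ?_⟩
      · rw [hfold, ← he]
      · intro k v hk
        by_cases hkn : k = n
        · subst hkn
          rw [PySem.Dict.get?_insert_self] at hk
          refine Or.inr ⟨hc0, ?_⟩
          rw [he0]
          exact (Option.some_inj.mp hk).symm
        · rw [PySem.Dict.get?_insert_of_ne _ _ hkn] at hk
          exact hok₂.1 k v hk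
      · intro k v hk
        by_cases hkn : k = n
        · subst hkn; rw [hc0] at hk; cases hk
        · rw [PySem.Dict.get?_insert_of_ne _ _ hkn]; exact hok₂.2 k v hk
      · intro k v hk
        by_cases hkn : k = n
        · subst hkn; rw [hcn] at hk; cases hk
        · rw [PySem.Dict.get?_insert_of_ne _ _ hkn]; exact hmono₂ k v hk

-- ---- unfolding bridges for B's loop ----
lemma pvLoopB_nil (parents declared cache : PySem.Dict String (List String))
    (va : List String × List String) :
    pvLoopB parents declared cache [] va = va := by
  rw [pvLoopB]

lemma pvLoopB_mem (parents declared cache : PySem.Dict String (List String))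
    {v : List String} (a : List String) {n : String} (rest : List String)
    (h : PySem.Set.contains v n = true) :
    pvLoopB parents declared cache (n :: rest) (v, a)
      = pvLoopB parents declared cache rest (v, a) := by
  rw [pvLoopB, dif_pos h]

lemma pvLoopB_cached (parents declared cache : PySem.Dict String (List String))
    {v : List String} (a : List String) {n : String} (rest : List String)
    (h : ¬ PySem.Set.contains v n = true) {s : List String}
    (hc : PySem.Dict.get? cache n = some s) :
    pvLoopB parents declared cache (n :: rest) (v, a)
      = pvLoopB parents declared cache rest (PySem.Set.add v n, PySem.Set.update a s) := by
  rw [pvLoopB, dif_neg h, hc]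

lemma pvLoopB_rec (parents declared cache : PySem.Dict String (List String))
    {v : List String} (a : List String) {n : String} (rest : List String)
    (h : ¬ PySem.Set.contains v n = true)
    (hc : PySem.Dict.get? cache n = none) :
    pvLoopB parents declared cache (n :: rest) (v, a)
      = pvLoopB parents declared cache (PySem.Dict.getD parents n [] ++ rest)
          (PySem.Set.add v n, PySem.Set.update a (PySem.Dict.getD declared n [])) := by
  rw [pvLoopB, dif_neg h, hc]

-- ---- B's loop computes pvEspec (continuation-style: processing one stack entry fully) ----
lemma pvBmain (parents declared cache0 : PySem.Dict String (List String)) :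
    ∀ N : Nat, ∀ n seen v a,
      pvMeasP parents (fun _ => true) v < N →
      pvAcyc parents cache0 seen n = true →
      (∀ m ∈ v, m ∉ seen → pvAcyc parents cache0 [] m = true ∧
          ∀ x ∈ pvEspec parents declared cache0 [] m, x ∈ a) →
      ∃ v', (∀ s2, pvLoopB parents declared cache0 (n :: s2) (v, a)
              = pvLoopB parents declared cache0 s2
                  (v', PySem.Set.update a (pvEspec parents declared cache0 seen n))) ∧
            (∀ m ∈ v, m ∈ v') ∧ n ∈ v' ∧
            (∀ m ∈ v', m ∉ seen → pvAcyc parents cache0 [] m = true ∧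
                ∀ x ∈ pvEspec parents declared cache0 [] m,
                  x ∈ PySem.Set.update a (pvEspec parents declared cache0 seen n)) := by
  intro N
  induction N with
  | zero => intro n seen v a hme; omega
  | succ N ih =>
    intro n seen v a hme hac hinv
    have hs : n ∉ seen := by
      intro hx; rw [pvAcyc_seen hx] at hac; cases hac
    have hEseq : pvEspec parents declared cache0 [] n = pvEspec parents declared cache0 seen n :=
      pvEspecWeaken parents declared cache0 hac [] (by simp)
    by_cases hv : n ∈ v
    · have hcont : PySem.Set.contains v n = true := (PySem.Set.contains_iff v n).mpr hv
      have hupd : PySem.Set.update a (pvEspec parents declared cache0 seen n) = a :=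
        pvUpdAllMem _ _ (fun x hx => (hinv n hv hs).2 x (by rw [hEseq]; exact hx))
      refine ⟨v, ?_, fun m hm => hm, hv, ?_⟩
      · intro s2
        rw [pvLoopB_mem parents declared cache0 a s2 hcont, hupd]
      · intro m hm hms
        rw [hupd]
        exact hinv m hm hms
    · have hcont : ¬ PySem.Set.contains v n = true := by
        intro hb; exact hv ((PySem.Set.contains_iff v n).mp hb)
      have hadd : PySem.Set.add v n = v ++ [n] := PySem.Set.add_of_not_mem hv
      cases hcc : PySem.Dict.get? cache0 n with
      | some s =>
        have he : pvEspec parents declared cache0 seen n = s := pvEspec_cached hs hcc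
        have he0 : pvEspec parents declared cache0 [] n = s := pvEspec_cached (by simp) hcc
        refine ⟨v ++ [n], ?_, fun m hm => List.mem_append_left _ hm,
          List.mem_append_right _ (by simp), ?_⟩
        · intro s2
          rw [pvLoopB_cached parents declared cache0 a s2 hcont hcc, hadd, he]
        · intro m hm hms
          rcases List.mem_append.mp hm with hm' | hm'
          · obtain ⟨h1, h2⟩ := hinv m hm' hms
            exact ⟨h1, fun x hx => (PySem.Set.mem_update _ _ _).mpr (Or.inl (h2 x hx))⟩
          · have hmn : m = n := by simpa using hm'
            subst hmn
            refine ⟨pvAcyc_cached (by simp) hcc, ?_⟩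
            intro x hx
            rw [he0] at hx
            rw [he]
            exact (PySem.Set.mem_update _ _ _).mpr (Or.inr hx)
      | none =>
        have hacR := hac
        rw [pvAcyc_rec hs hcc, List.all_eq_true] at hacR
        have he : pvEspec parents declared cache0 seen n
            = (PySem.Dict.getD parents n []).foldl
                (fun acc p => PySem.Set.update acc (pvEspec parents declared cache0 (n :: seen) p))
                (PySem.Set.ofList (PySem.Dict.getD declared n [])) := pvEspec_rec hs hcc
        have IC : ∀ ps' : List String, (∀ p ∈ ps', pvAcyc parents cache0 (n :: seen) p = true) →
            (∀ p ∈ ps', p ∈ PySem.Dict.getD parents n []) →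
            ∀ (v₁ a₁ : List String), (∀ m ∈ v, m ∈ v₁) → n ∈ v₁ →
              (∀ m ∈ v₁, m ∉ (n :: seen) → pvAcyc parents cache0 [] m = true ∧
                  ∀ x ∈ pvEspec parents declared cache0 [] m, x ∈ a₁) →
              ∃ v₂, (∀ s2, pvLoopB parents declared cache0 (ps' ++ s2) (v₁, a₁)
                    = pvLoopB parents declared cache0 s2
                        (v₂, ps'.foldl
                          (fun acc p => PySem.Set.update acc (pvEspec parents declared cache0 (n :: seen) p)) a₁))
                ∧ (∀ m ∈ v₁, m ∈ v₂)
                ∧ (∀ m ∈ v₂, m ∉ (n :: seen) → pvAcyc parents cache0 [] m = true ∧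
                    ∀ x ∈ pvEspec parents declared cache0 [] m,
                      x ∈ ps'.foldl
                        (fun acc p => PySem.Set.update acc (pvEspec parents declared cache0 (n :: seen) p)) a₁) := by
          intro ps'
          induction ps' with
          | nil => intro _ _ v₁ a₁ h1 h2 h3; exact ⟨v₁, fun s2 => rfl, fun m hm => hm, h3⟩
          | cons p ps' ihp =>
            intro hall hmem v₁ a₁ hvv hnv1 hinv1
            have hnk : n ∈ parents.keys := pvMemKeys_of_mem_getD (hmem p List.mem_cons_self)
            have hlt : pvMeasP parents (fun _ => true) v₁ < pvMeasP parents (fun _ => true) v :=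
              pvFiltLt _ _ v v₁ (fun x hx => hvv x hx) n hnk rfl hv hnv1
            obtain ⟨v₂, heq, hmm, hn2, hinv2⟩ :=
              ih p (n :: seen) v₁ a₁ (by omega) (hall p List.mem_cons_self) hinv1
            obtain ⟨v₃, heq3, hmm3, hinv3⟩ :=
              ihp (fun q hq => hall q (List.mem_cons_of_mem _ hq))
                (fun q hq => hmem q (List.mem_cons_of_mem _ hq)) v₂
                (PySem.Set.update a₁ (pvEspec parents declared cache0 (n :: seen) p))
                (fun m hm => hmm m (hvv m hm)) (hmm n hnv1) hinv2
            refine ⟨v₃, ?_, fun m hm => hmm3 m (hmm m hm), hinv3⟩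
            intro s2
            have : (p :: ps') ++ s2 = p :: (ps' ++ s2) := rfl
            rw [this, heq (ps' ++ s2), heq3 s2]
            simp only [List.foldl_cons]
        obtain ⟨v₂, hfold, hmm2, hinv2f⟩ :=
          IC (PySem.Dict.getD parents n []) hacR (fun p hp => hp)
            (v ++ [n]) (PySem.Set.update a (PySem.Dict.getD declared n []))
            (fun m hm => List.mem_append_left _ hm) (List.mem_append_right _ (by simp))
            (by
              intro m hm hmns
              rcases List.mem_append.mp hm with hm' | hm'
              · have hms : m ∉ seen := fun hx => hmns (List.mem_cons_of_mem _ hx)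
                obtain ⟨h1, h2⟩ := hinv m hm' hms
                exact ⟨h1, fun x hx => (PySem.Set.mem_update _ _ _).mpr (Or.inl (h2 x hx))⟩
              · have hmn : m = n := by simpa using hm'
                exact absurd (hmn ▸ List.mem_cons_self) (fun h => hmns h))
        have hval : (PySem.Dict.getD parents n []).foldl
              (fun acc p => PySem.Set.update acc (pvEspec parents declared cache0 (n :: seen) p))
              (PySem.Set.update a (PySem.Dict.getD declared n []))
            = PySem.Set.update a (pvEspec parents declared cache0 seen n) := by
          rw [he, ← pvUpdOfList a (PySem.Dict.getD declared n [])]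
          exact pvFoldAssoc _ _ a (PySem.Set.ofList (PySem.Dict.getD declared n []))
        refine ⟨v₂, ?_, fun m hm => hmm2 m (List.mem_append_left _ hm),
          hmm2 n (List.mem_append_right _ (by simp)), ?_⟩
        · intro s2
          rw [pvLoopB_rec parents declared cache0 a s2 hcont hcc, hadd, hfold s2, hval]
        · intro m hm hms
          by_cases hmn : m = n
          · subst hmn
            refine ⟨pvAcycWeaken parents cache0 hac [] (by simp), ?_⟩
            intro x hx
            rw [hEseq] at hx
            exact (PySem.Set.mem_update _ _ _).mpr (Or.inr hx)
          · have hres := hinv2f m hm (by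
              intro hx
              rcases List.mem_cons.mp hx with h' | h'
              · exact hmn h'
              · exact hms h')
            rw [hval] at hres
            exact hres

-- ===== VERDICT (by name: the statement is the Claim_ definition above) =====
theorem expand_interface_methods_spec : Claim_equal_expand_interface_methods := by
  intro iface parents declared cache _ hpre
  obtain ⟨hacycB, hnodup⟩ := hpre
  have hacyc : pvAcyc (PySem.Dict.mk parents) (PySem.Dict.mk cache) [] iface = true := by
    rw [← pvAcycB_eq (PySem.Dict.mk parents) (PySem.Dict.mk cache) (parents.length + 1) [] iface
      (by have := pvMeasPLe parents (fun _ => true) []; omega)]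
    exact hacycB
  unfold Spec_expand_interface_methods expand_interface_methods expand_interface_methods_alt
  have hnd : ∀ k v, PySem.Dict.get? (PySem.Dict.mk cache) k = some v → v.Nodup := by
    intro k v h
    exact hnodup (k, v) (PySem.Dict.mem_items_of_get?_eq_some _ h)
  have hA := pvAmain (PySem.Dict.mk parents) (PySem.Dict.mk declared) (PySem.Dict.mk cache)
      (parents.length + 1) iface [] (PySem.Dict.mk cache)
      ⟨fun k v h => Or.inl h, fun k v h => h⟩ hacyc
      (by have := pvMeasPLe parents (fun _ => true) []; omega)
  have hB := pvBmain (PySem.Dict.mk parents) (PySem.Dict.mk declared) (PySem.Dict.mk cache)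
      (pvMeasP (PySem.Dict.mk parents) (fun _ => true) [] + 1) iface [] [] []
      (by omega) hacyc (by intro m hm; simp at hm)
  obtain ⟨c', hAeq, -, -⟩ := hA
  obtain ⟨v', hBeq, -, -, -⟩ := hB
  rw [hAeq, hBeq [], pvLoopB_nil]
  simp only [PySem.Set.update_nil_left]
  rw [PySem.Set.ofList_eq_self_of_nodup _
    (pvEspecNodup (PySem.Dict.mk parents) (PySem.Dict.mk declared) (PySem.Dict.mk cache) hnd [] iface)]
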